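-- pv_equiv track=rewrite | github.com/Gu-Lab-RBL-NCI/scripts-susanna | getUniqueMotif.py | inIUPACMatureSeq
-- ===== SOURCE A (Python) =====
-- def inIUPACMatureSeq(motif, sequences):
--     motif_len = len(motif)
--
--     for seq in sequences:
--         for i in range(0, len(seq)-motif_len+1):
--
--             temp_seq = seq[i:i+motif_len]
--
--             for m in range(0, motif_len):
--
--                 if motif[m] in 'N':
--                     temp_seq = temp_seq[:m] + 'N' + temp_seq[m+1:]
--
--             if temp_seq in motif or motif in temp_seq:
--                 return True
--
--     return False
-- ===== SOURCE B (Python) =====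
-- def inIUPACMatureSeq(motif, sequences):
--     # Bitap (shift-and) wildcard matcher: precompute per-character bitmasks of
--     # motif positions ('N' in the motif matches any character), then scan each
--     # sequence left to right once updating an automaton state bitmask; a set
--     # high bit means a full-length match just ended.
--     n = len(motif)
--     if n == 0:
--         return bool(sequences)
--     wild = 0
--     lit = {}
--     for m, c in enumerate(motif):
--         if c == 'N':
--             wild |= 1 << m
--         else:
--             lit[c] = lit.get(c, 0) | (1 << m)
--     goal = 1 << (n - 1)
--     for seq in sequences:
--         state = 0
--         for ch in seq:
--             state = ((state << 1) | 1) & (lit.get(ch, 0) | wild)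
--             if state & goal:
--                 return True
--     return False
-- ===== Notes on version B (the rewrite author's own statement) =====
-- stated objective: alternative
-- what changed: B is a bitap (shift-and) matcher: it compiles the motif once into per-character position bitmasks ('N' becomes a wildcard mask) and scans each sequence left-to-right once, updating an automaton state bitmask per character, instead of A's explicit sliding window with per-window string surgery and substring tests.
import Mathlib
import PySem

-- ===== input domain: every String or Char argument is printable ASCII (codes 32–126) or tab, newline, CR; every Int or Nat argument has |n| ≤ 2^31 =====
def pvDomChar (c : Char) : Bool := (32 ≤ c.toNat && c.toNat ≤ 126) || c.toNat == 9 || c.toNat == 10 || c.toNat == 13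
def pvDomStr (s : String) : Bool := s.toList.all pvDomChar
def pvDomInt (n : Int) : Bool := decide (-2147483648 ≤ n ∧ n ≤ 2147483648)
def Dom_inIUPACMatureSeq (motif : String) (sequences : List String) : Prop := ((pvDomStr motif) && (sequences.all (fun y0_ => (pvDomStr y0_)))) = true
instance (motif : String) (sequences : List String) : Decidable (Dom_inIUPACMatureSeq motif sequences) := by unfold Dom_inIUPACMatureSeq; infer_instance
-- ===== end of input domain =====

-- B replaces A's window-by-window masked-string comparison with a bitap (shift-and)
-- automaton: per-character position bitmasks built once from the motif, then one
-- state-bitmask update per sequence character (objective: alternative).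


-- ===== PORT A =====
-- Literal port of A. Notes on exactness:
-- * the early 'return True' inside the nested for-loops is the search `List.any`;
-- * `motif[m] in 'N'` — m is always in range, and membership of a one-character
--   string in "N" is equality of that character with 'N', i.e. pyGet? = some 'N';
-- * `temp_seq[:m] + 'N' + temp_seq[m+1:]` is slices + append, kept as such;
-- * `x in y` on strings is the Python substring test, PySem.Chars.isIn.
def inIUPACMatureSeq (motif : String) (sequences : List String) : Bool :=
  let ms := motif.toList
  let motifLen : Int := (ms.length : Int)
  sequences.any (fun seqS =>
    let s := seqS.toList
    (PySem.List.pyRange 0 ((s.length : Int) - motifLen + 1)).any (fun i =>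
      let temp0 := PySem.List.slice s (some i) (some (i + motifLen))
      let temp := (PySem.List.pyRange 0 motifLen).foldl (fun t m =>
        if PySem.List.pyGet? ms m == some 'N' then
          PySem.List.slice t none (some m) ++ ['N'] ++ PySem.List.slice t (some (m + 1)) none
        else t) temp0
      PySem.Chars.isIn temp ms || PySem.Chars.isIn ms temp))

-- ===== PORT B =====
-- Literal port of Source B (bitap / shift-and). The bitmask integers in Source B are
-- nonnegative Python ints, ported as Nat (<< | & coincide); the truthiness test
-- `if state & goal:` is `&&& goal != 0`. pvScanB is the inner `for ch in seq`
-- loop with its early `return True`; the mask-building loop over enumerate(motif)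
-- is the fold over zipIdx (= enumerate, Nat indices).
def pvScanB (lit : PySem.Dict Char Nat) (wild goal : Nat) : Nat → List Char → Bool
  | _, [] => false
  | st, ch :: rest =>
    let st' := ((st <<< 1) ||| 1) &&& (lit.getD ch 0 ||| wild)
    if st' &&& goal != 0 then true else pvScanB lit wild goal st' rest

def inIUPACMatureSeq_alt (motif : String) (sequences : List String) : Bool :=
  let ms := motif.toList
  let n := ms.length
  if n == 0 then !sequences.isEmpty
  else
    let wl := ms.zipIdx.foldl
      (fun (acc : Nat × PySem.Dict Char Nat) q =>
        if q.1 == 'N' then (acc.1 ||| (1 <<< q.2), acc.2)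
        else (acc.1, acc.2.insert q.1 (acc.2.getD q.1 0 ||| (1 <<< q.2))))
      (0, PySem.Dict.empty)
    let goal := 1 <<< (n - 1)
    sequences.any (fun seqS => pvScanB wl.2 wl.1 goal 0 seqS.toList)

-- ===== PRECONDITION & SPEC =====
def Spec_inIUPACMatureSeq (motif : String) (sequences : List String) (out : Bool) : Prop := out = inIUPACMatureSeq_alt motif sequences
instance (motif : String) (sequences : List String) (out : Bool) : Decidable (Spec_inIUPACMatureSeq motif sequences out) := by unfold Spec_inIUPACMatureSeq; infer_instance

-- ===== CLAIM (what is proved, stated in full; the proofs are below) =====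
def Claim_equal_inIUPACMatureSeq : Prop := ∀ (motif : String) (sequences : List String), Dom_inIUPACMatureSeq motif sequences → Spec_inIUPACMatureSeq motif sequences (inIUPACMatureSeq motif sequences)

-- ===== LEMMAS AND PROOFS =====

def pvPM (ms s : List Char) (k j : Nat) : Prop :=
  k < ms.length ∧ k ≤ j ∧ j < s.length ∧
    ∀ t : Nat, t ≤ k → (ms[t]? = some 'N' ∨ s[j - k + t]? = ms[t]?)

def pvLit (ms s : List Char) (a : Nat) : Prop :=
  ∀ m : Nat, m < ms.length → (ms[m]? = some 'N' ∨ s[a + m]? = ms[m]?)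
theorem foldA_spec (ms : List Char) (k : Nat) (t : List Char) (hk : k ≤ t.length) :
    ((List.range k).foldl (fun t (m : Nat) =>
        if ms[m]? == some 'N' then List.take m t ++ 'N' :: List.drop (m + 1) t else t) t).length
      = t.length ∧
    ∀ j : Nat, ((List.range k).foldl (fun t (m : Nat) =>
        if ms[m]? == some 'N' then List.take m t ++ 'N' :: List.drop (m + 1) t else t) t)[j]?
      = if j < k ∧ ms[j]? = some 'N' then some 'N' else t[j]? := by
  induction k with
  | zero => simp
  | succ k ih =>
    obtain ⟨hl, hg⟩ := ih (Nat.le_of_succ_le hk)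
    rw [List.range_succ, List.foldl_append, List.foldl_cons, List.foldl_nil]
    set u := (List.range k).foldl (fun t (m : Nat) =>
        if ms[m]? == some 'N' then List.take m t ++ 'N' :: List.drop (m + 1) t else t) t with hu
    have hklt : k < u.length := by omega
    have hset : List.take k u ++ 'N' :: List.drop (k + 1) u = u.set k 'N' := by
      rw [List.set_eq_take_append_cons_drop, if_pos hklt]
    by_cases hN : ms[k]? = some 'N'
    · rw [if_pos (by simpa using hN), hset]
      refine ⟨by simpa using hl, fun j => ?_⟩
      rw [List.getElem?_set]
      rcases eq_or_ne k j with rfl | hne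
      · simp [hklt, hN]
      · rw [if_neg hne, hg j]
        by_cases hjk : j < k
        · simp [hjk, Nat.lt_succ_of_lt hjk]
        · have : ¬ j < k + 1 := by omega
          simp [hjk, this]
    · rw [if_neg (by simpa using hN)]
      refine ⟨hl, fun j => ?_⟩
      rw [hg j]
      by_cases hjk : j < k
      · simp [hjk, Nat.lt_succ_of_lt hjk]
      · by_cases hjk1 : j < k + 1
        · have : j = k := by omega
          subst this
          simp [hN]
        · simp [hjk, hjk1]

theorem windowA_iff (ms s : List Char) (i : Int) (h0 : 0 ≤ i)
    (h1 : i + (ms.length : Int) ≤ (s.length : Int)) :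
    (let temp0 := PySem.List.slice s (some i) (some (i + (ms.length : Int)))
     let temp := (PySem.List.pyRange 0 (ms.length : Int)).foldl (fun t m =>
        if PySem.List.pyGet? ms m == some 'N' then
          PySem.List.slice t none (some m) ++ ['N'] ++ PySem.List.slice t (some (m + 1)) none
        else t) temp0
     PySem.Chars.isIn temp ms || PySem.Chars.isIn ms temp) = true ↔ pvLit ms s i.toNat := by
  obtain ⟨a, rfl⟩ := Int.eq_ofNat_of_zero_le h0
  have hwin : (a : Nat) + ms.length ≤ s.length := by exact_mod_cast h1
  have hslice : PySem.List.slice s (some (a : Int)) (some ((a : Int) + (ms.length : Int)))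
      = List.take ms.length (List.drop a s) := by
    have : ((a : Int) + (ms.length : Int)) = ((a + ms.length : Nat) : Int) := by push_cast; ring
    rw [this, PySem.List.slice_natCast]
    congr 1; omega
  have hfold : ∀ t : List Char,
      (PySem.List.pyRange 0 (ms.length : Int)).foldl (fun t m =>
        if PySem.List.pyGet? ms m == some 'N' then
          PySem.List.slice t none (some m) ++ ['N'] ++ PySem.List.slice t (some (m + 1)) none
        else t) t
      = (List.range ms.length).foldl (fun t (m : Nat) =>
          if ms[m]? == some 'N' then List.take m t ++ 'N' :: List.drop (m + 1) t else t) t := by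
    intro t
    rw [PySem.List.pyRange_zero_natCast, List.foldl_map]
    apply PySem.List.foldl_congr_mem
    intro acc m _
    have e1 : PySem.List.slice acc none (some (m : Int)) = List.take m acc := by
      rw [PySem.List.slice_to acc (by positivity)]; simp
    have e2 : PySem.List.slice acc (some ((m : Int) + 1)) none = List.drop (m + 1) acc := by
      have : ((m : Int) + 1) = ((m + 1 : Nat) : Int) := by push_cast; ring
      rw [this, PySem.List.slice_from acc (by positivity)]; simp
    rw [PySem.List.pyGet?_natCast, e1, e2]; simp
  simp only [hslice, hfold]
  set w := List.take ms.length (List.drop a s) with hw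
  have hwl : w.length = ms.length := by
    simp [hw]; omega
  obtain ⟨hlen, hget⟩ := foldA_spec ms ms.length w (le_of_eq hwl.symm)
  set temp := (List.range ms.length).foldl (fun t (m : Nat) =>
      if ms[m]? == some 'N' then List.take m t ++ 'N' :: List.drop (m + 1) t else t) w with htemp
  have htl : temp.length = ms.length := by rw [hlen, hwl]
  have hA : (PySem.Chars.isIn temp ms || PySem.Chars.isIn ms temp) = true ↔ temp = ms := by
    constructor
    · intro h
      rcases Bool.or_eq_true_iff.1 h with h | h
      · exact (PySem.Chars.isIn_iff_infix _ _).1 h |>.eq_of_length htl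
      · exact ((PySem.Chars.isIn_iff_infix _ _).1 h |>.eq_of_length htl.symm).symm
    · intro h
      exact Bool.or_eq_true_iff.2 (Or.inl ((PySem.Chars.isIn_iff_infix _ _).2 (h ▸ List.infix_refl _)))
  have hEq : temp = ms ↔ ∀ m : Nat, ∀ h : m < ms.length, ms[m] ≠ 'N' → s[a + m]? = some ms[m] := by
    constructor
    · intro h m hm hne
      have := congrArg (fun l => l[m]?) h
      simp only [hget m] at this
      have hwm : w[m]? = s[a + m]? := by
        rw [hw, List.getElem?_take, if_pos hm, List.getElem?_drop]
      have hmsN : ¬ (m < ms.length ∧ ms[m]? = some 'N') := by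
        rintro ⟨-, hc⟩
        exact hne (by simpa [List.getElem?_eq_getElem hm] using hc)
      rw [if_neg hmsN, hwm] at this
      rw [this, List.getElem?_eq_getElem hm]
    · intro h
      apply List.ext_getElem?
      intro j
      rw [hget j]
      by_cases hj : j < ms.length
      · by_cases hN : ms[j]? = some 'N'
        · rw [if_pos ⟨hj, hN⟩, List.getElem?_eq_getElem hj]
          simpa [List.getElem?_eq_getElem hj] using hN.symm
        · rw [if_neg (by tauto)]
          have hne : ms[j] ≠ 'N' := fun hc => hN (by simp [List.getElem?_eq_getElem hj, hc])
          rw [hw, List.getElem?_take, if_pos hj, List.getElem?_drop, h j hj hne,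
            List.getElem?_eq_getElem hj]
      · rw [if_neg (by tauto)]
        have h1 : w[j]? = none := List.getElem?_eq_none (by omega)
        have h2 : ms[j]? = none := List.getElem?_eq_none (by omega)
        rw [h1, h2]
  rw [hA, hEq]
  have hto : ((a : Int)).toNat = a := Int.toNat_natCast a
  rw [hto]
  unfold pvLit
  constructor
  · intro h m hm
    by_cases hN : ms[m] = 'N'
    · exact Or.inl (by simp [List.getElem?_eq_getElem hm, hN])
    · exact Or.inr (by rw [h m hm hN, List.getElem?_eq_getElem hm])
  · intro h m hm hne
    rcases h m hm with hc | hc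
    · exact absurd (by simpa [List.getElem?_eq_getElem hm] using hc) hne
    · rw [hc, List.getElem?_eq_getElem hm]
theorem A_iff (motif : String) (sequences : List String) :
    inIUPACMatureSeq motif sequences = true ↔
      ∃ seqS ∈ sequences, ∃ a : Nat,
        a + motif.toList.length ≤ seqS.toList.length ∧ pvLit motif.toList seqS.toList a := by
  unfold inIUPACMatureSeq
  simp only [List.any_eq_true]
  constructor
  · rintro ⟨seqS, hmem, i, hi, hbody⟩
    obtain ⟨h0, hlt⟩ := PySem.List.mem_pyRange_one.1 hi
    refine ⟨seqS, hmem, i.toNat, by omega, ?_⟩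
    exact (windowA_iff motif.toList seqS.toList i h0 (by omega)).1 hbody
  · rintro ⟨seqS, hmem, a, hle, hlit⟩
    refine ⟨seqS, hmem, (a : Int),
      PySem.List.mem_pyRange_one.2 ⟨by positivity, by push_cast; omega⟩, ?_⟩
    apply (windowA_iff motif.toList seqS.toList (a : Int) (by positivity) (by push_cast; omega)).2
    simpa [Int.toNat_natCast] using hlit

theorem mask_spec (ms : List Char) :
    (∀ k : Nat, (ms.zipIdx.foldl
      (fun (acc : Nat × PySem.Dict Char Nat) q =>
        if q.1 == 'N' then (acc.1 ||| (1 <<< q.2), acc.2)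
        else (acc.1, acc.2.insert q.1 (acc.2.getD q.1 0 ||| (1 <<< q.2))))
      (0, PySem.Dict.empty)).1.testBit k = true ↔ ms[k]? = some 'N') ∧
    (∀ c : Char, ∀ k : Nat, ((ms.zipIdx.foldl
      (fun (acc : Nat × PySem.Dict Char Nat) q =>
        if q.1 == 'N' then (acc.1 ||| (1 <<< q.2), acc.2)
        else (acc.1, acc.2.insert q.1 (acc.2.getD q.1 0 ||| (1 <<< q.2))))
      (0, PySem.Dict.empty)).2.getD c 0).testBit k = true ↔ (ms[k]? = some c ∧ c ≠ 'N')) := by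
  induction ms using List.reverseRecOn with
  | nil => simp [PySem.Dict.getD_empty]
  | append_singleton xs c ih =>
    obtain ⟨ihw, ihd⟩ := ih
    rw [List.zipIdx_append, List.foldl_append]
    set F := (xs.zipIdx.foldl
      (fun (acc : Nat × PySem.Dict Char Nat) q =>
        if q.1 == 'N' then (acc.1 ||| (1 <<< q.2), acc.2)
        else (acc.1, acc.2.insert q.1 (acc.2.getD q.1 0 ||| (1 <<< q.2))))
      (0, PySem.Dict.empty)) with hF
    have hcell : ∀ k : Nat, (xs ++ [c])[k]? =
        if k < xs.length then xs[k]? else if k = xs.length then some c else none := by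
      intro k
      by_cases hk : k < xs.length
      · rw [List.getElem?_append_left hk, if_pos hk]
      · rw [List.getElem?_append_right (by omega), if_neg hk]
        rcases eq_or_ne k xs.length with rfl | hne
        · simp
        · rw [if_neg hne]
          apply List.getElem?_eq_none
          simp; omega
    simp only [List.zipIdx_cons, List.zipIdx_nil, List.foldl_cons, List.foldl_nil, Nat.zero_add]
    by_cases hc : c = 'N'
    · subst hc
      simp only [beq_self_eq_true, if_true]
      constructor
      · intro k
        rw [Nat.testBit_or, Nat.one_shiftLeft, hcell k]
        rcases Nat.lt_trichotomy k xs.length with hk | rfl | hk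
        · rw [Nat.testBit_two_pow_of_ne (by omega)]
          simp [ihw k, hk]
        · rw [Nat.testBit_two_pow_self]
          simp
        · have hx : xs[k]? = none := List.getElem?_eq_none (by omega)
          rw [Nat.testBit_two_pow_of_ne (by omega)]
          simp [ihw k, hx]
          omega
      · intro c' k
        rw [ihd c' k, hcell k]
        by_cases hk : k < xs.length
        · simp [hk]
        · have hx : xs[k]? = none := List.getElem?_eq_none (by omega)
          rcases eq_or_ne k xs.length with rfl | hne
          · simp [hx]
            intro h
            simp [← h]
          · simp [hk, hne, hx]
    · rw [if_neg (by simpa using hc)]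
      constructor
      · intro k
        rw [ihw k, hcell k]
        by_cases hk : k < xs.length
        · simp [hk]
        · have hx : xs[k]? = none := List.getElem?_eq_none (by omega)
          rcases eq_or_ne k xs.length with rfl | hne
          · simp [hx]
            intro h
            exact hc h
          · simp [hk, hne, hx]
      · intro c' k
        rw [PySem.Dict.getD_insert, hcell k]
        rcases eq_or_ne c' c with rfl | hne
        · rw [if_pos rfl, Nat.testBit_or, Nat.one_shiftLeft]
          rcases Nat.lt_trichotomy k xs.length with hk | rfl | hk
          · rw [Nat.testBit_two_pow_of_ne (by omega)]
            simp [ihd c' k, hk]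
          · rw [Nat.testBit_two_pow_self]
            simp [hc]
          · have hx : xs[k]? = none := List.getElem?_eq_none (by omega)
            rw [Nat.testBit_two_pow_of_ne (by omega)]
            simp [ihd c' k, hx]
            omega
        · rw [if_neg hne, ihd c' k]
          by_cases hk : k < xs.length
          · simp [hk]
          · have hx : xs[k]? = none := List.getElem?_eq_none (by omega)
            rcases eq_or_ne k xs.length with rfl | hke
            · simp [hx]
              intro h
              exact absurd h.symm hne
            · simp [hk, hke, hx]

theorem and_two_pow_ne_zero (x k : Nat) : (x &&& 2 ^ k ≠ 0) ↔ x.testBit k = true := by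
  constructor
  · intro h
    by_contra hb
    apply h
    apply Nat.eq_of_testBit_eq
    intro i
    rw [Nat.testBit_and, Nat.zero_testBit]
    rcases eq_or_ne i k with rfl | hne
    · simp [Bool.eq_false_iff.2 hb]
    · simp [Nat.testBit_two_pow_of_ne hne.symm]
  · intro h h0
    have := congrArg (fun y => y.testBit k) h0
    simp [Nat.testBit_and, h, Nat.testBit_two_pow_self] at this
theorem shift_or_one_testBit (st : Nat) (k : Nat) :
    ((st <<< 1) ||| 1).testBit k = if k = 0 then true else st.testBit (k - 1) := by
  rw [Nat.testBit_or, Nat.testBit_shiftLeft]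
  rcases eq_or_ne k 0 with rfl | h
  · simp
  · have h1 : Nat.testBit 1 k = false := by
      simpa using Nat.testBit_two_pow_of_ne (Ne.symm h) (n := 0)
    simp [h, Nat.one_le_iff_ne_zero.2 h, h1]

theorem scan_iff (lit : PySem.Dict Char Nat) (wild : Nat) (ms s : List Char)
    (hn : 1 ≤ ms.length)
    (hmask : ∀ c k, (lit.getD c 0 ||| wild).testBit k = true ↔
      (ms[k]? = some 'N' ∨ ms[k]? = some c)) :
    ∀ (s2 : List Char) (p : Nat) (st : Nat), s2 = s.drop p → p ≤ s.length →
      (∀ k, st.testBit k = true ↔ (1 ≤ p ∧ pvPM ms s k (p - 1))) →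
      (pvScanB lit wild (1 <<< (ms.length - 1)) st s2 = true ↔
        ∃ j, p ≤ j ∧ pvPM ms s (ms.length - 1) j) := by
  intro s2
  induction s2 with
  | nil =>
    intro p st hs2 hp hInv
    simp only [pvScanB]
    constructor
    · intro h; cases h
    · rintro ⟨j, hpj, hk, hkj, hjs, _⟩
      have hlen : s.length ≤ p := by
        by_contra hlt
        push_neg at hlt
        have := List.drop_eq_nil_iff.1 hs2.symm
        omega
      omega
  | cons ch rest ih =>
    intro p st hs2 hp hInv
    have hps : p < s.length := by
      by_contra hge
      push_neg at hge
      rw [List.drop_eq_nil_of_le hge] at hs2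
      cases hs2
    have hch : s[p]? = some ch := by
      have h0 : (s.drop p)[0]? = some ch := by rw [← hs2]; rfl
      simpa [List.getElem?_drop] using h0
    have hrest : rest = s.drop (p + 1) := by
      have := congrArg List.tail hs2
      simpa [List.tail_drop] using this
    simp only [pvScanB]
    have hInv' : ∀ k, (((st <<< 1) ||| 1) &&& (lit.getD ch 0 ||| wild)).testBit k = true ↔
        pvPM ms s k p := by
      intro k
      rw [Nat.testBit_and, Bool.and_eq_true, shift_or_one_testBit, hmask]
      cases k with
      | zero =>
        simp only [reduceIte, true_and]
        unfold pvPM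
        constructor
        · intro hm
          have hk0 : 0 < ms.length := by
            rcases hm with hm | hm <;>
              exact (List.getElem?_eq_some_iff.1 hm).1
          refine ⟨hk0, Nat.zero_le _, hps, fun t ht => ?_⟩
          have ht0 : t = 0 := Nat.le_zero.1 ht
          subst ht0
          simp only [Nat.sub_zero, Nat.add_zero]
          rcases hm with hm | hm
          · exact Or.inl hm
          · exact Or.inr (by rw [hch, hm])
        · rintro ⟨hk0, -, -, hall⟩
          have := hall 0 le_rfl
          simp only [Nat.sub_zero, Nat.add_zero] at this
          rcases this with hm | hm
          · exact Or.inl hm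
          · exact Or.inr (by rw [← hm, hch])
      | succ k' =>
        rw [if_neg (Nat.succ_ne_zero k'), Nat.succ_sub_one]
        rw [hInv k']
        unfold pvPM
        constructor
        · rintro ⟨⟨hp1, hk'n, hk'p, hp1s, hall⟩, hm⟩
          have hkn : k' + 1 < ms.length := by
            rcases hm with hm | hm <;>
              exact (List.getElem?_eq_some_iff.1 hm).1
          refine ⟨hkn, by omega, hps, fun t ht => ?_⟩
          rcases Nat.lt_or_ge t (k' + 1) with htl | hte
          · have ht' : t ≤ k' := by omega
            have := hall t ht'
            have hidx : p - 1 - k' + t = p - (k' + 1) + t := by omega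
            rwa [hidx] at this
          · have ht1 : t = k' + 1 := by omega
            subst ht1
            have hidx : p - (k' + 1) + (k' + 1) = p := by omega
            rw [hidx]
            rcases hm with hm | hm
            · exact Or.inl hm
            · exact Or.inr (by rw [hch, hm])
        · rintro ⟨hkn, hkp, -, hall⟩
          have h1p : 1 ≤ p := by omega
          refine ⟨⟨h1p, ⟨by omega, by omega, by omega, fun t ht => ?_⟩⟩, ?_⟩
          · have := hall t (by omega)
            have hidx : p - (k' + 1) + t = p - 1 - k' + t := by omega
            rwa [hidx] at this
          · have := hall (k' + 1) le_rfl
            have hidx : p - (k' + 1) + (k' + 1) = p := by omega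
            rw [hidx] at this
            rcases this with hm | hm
            · exact Or.inl hm
            · exact Or.inr (by rw [← hm, hch])
    have hand : ∀ x : Nat, (x &&& 1 <<< (ms.length - 1) ≠ 0) ↔ x.testBit (ms.length - 1) = true := by
      intro x
      rw [Nat.one_shiftLeft]
      exact and_two_pow_ne_zero _ _
    by_cases hcond : (((st <<< 1) ||| 1) &&& (lit.getD ch 0 ||| wild)) &&& 1 <<< (ms.length - 1) ≠ 0
    · rw [if_pos (by simpa [bne_iff_ne] using hcond)]
      have hPM : pvPM ms s (ms.length - 1) p :=
        (hInv' _).1 ((hand _).1 hcond)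
      simp only [true_iff]
      exact ⟨p, le_rfl, hPM⟩
    · rw [if_neg (by simpa [bne_iff_ne] using hcond)]
      have hnPM : ¬ pvPM ms s (ms.length - 1) p := by
        intro h
        exact hcond ((hand _).2 ((hInv' _).2 h))
      rw [ih (p + 1) (((st <<< 1) ||| 1) &&& (lit.getD ch 0 ||| wild)) hrest (by omega)
        (fun k => by rw [hInv' k]; simp)]
      constructor
      · rintro ⟨j, hj, hPM⟩
        exact ⟨j, by omega, hPM⟩
      · rintro ⟨j, hj, hPM⟩
        rcases eq_or_ne j p with rfl | hne
        · exact absurd hPM hnPM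
        · exact ⟨j, by omega, hPM⟩

theorem PM_iff_Lit (ms s : List Char) (hn : 1 ≤ ms.length) :
    (∃ j, pvPM ms s (ms.length - 1) j) ↔
      ∃ a, a + ms.length ≤ s.length ∧ pvLit ms s a := by
  constructor
  · rintro ⟨j, hkn, hkj, hjs, hall⟩
    refine ⟨j + 1 - ms.length, by omega, fun m hm => ?_⟩
    have := hall m (by omega)
    have hidx : j - (ms.length - 1) + m = j + 1 - ms.length + m := by omega
    rwa [hidx] at this
  · rintro ⟨a, hle, hlit⟩
    refine ⟨a + ms.length - 1, by omega, by omega, by omega, fun t ht => ?_⟩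
    have := hlit t (by omega)
    have hidx : a + ms.length - 1 - (ms.length - 1) + t = a + t := by omega
    rw [hidx]
    exact this

theorem B_iff (motif : String) (sequences : List String) :
    inIUPACMatureSeq_alt motif sequences = true ↔
      ∃ seqS ∈ sequences, ∃ a : Nat,
        a + motif.toList.length ≤ seqS.toList.length ∧ pvLit motif.toList seqS.toList a := by
  unfold inIUPACMatureSeq_alt
  by_cases h0 : motif.toList.length = 0
  · rw [if_pos (by simpa using h0)]
    constructor
    · intro h
      cases sequences with
      | nil => simp at h
      | cons x rest =>
        exact ⟨x, List.mem_cons_self, 0, by omega, fun m hm => by omega⟩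
    · rintro ⟨s, hmem, -⟩
      simpa using List.ne_nil_of_mem hmem
  · rw [if_neg (by simpa using h0)]
    rw [List.any_eq_true]
    have hmask : ∀ c k, (((motif.toList.zipIdx.foldl
        (fun (acc : Nat × PySem.Dict Char Nat) q =>
          if q.1 == 'N' then (acc.1 ||| (1 <<< q.2), acc.2)
          else (acc.1, acc.2.insert q.1 (acc.2.getD q.1 0 ||| (1 <<< q.2))))
        (0, PySem.Dict.empty)).2.getD c 0 |||
        (motif.toList.zipIdx.foldl
        (fun (acc : Nat × PySem.Dict Char Nat) q =>
          if q.1 == 'N' then (acc.1 ||| (1 <<< q.2), acc.2)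
          else (acc.1, acc.2.insert q.1 (acc.2.getD q.1 0 ||| (1 <<< q.2))))
        (0, PySem.Dict.empty)).1).testBit k = true ↔
        (motif.toList[k]? = some 'N' ∨ motif.toList[k]? = some c)) := by
      intro c k
      obtain ⟨hw, hd⟩ := mask_spec motif.toList
      rw [Nat.testBit_or, Bool.or_eq_true, hd c k, hw k]
      constructor
      · rintro (⟨hm, -⟩ | hm)
        · exact Or.inr hm
        · exact Or.inl hm
      · rintro (hm | hm)
        · exact Or.inr hm
        · by_cases hc : c = 'N'
          · subst hc
            exact Or.inr hm
          · exact Or.inl ⟨hm, hc⟩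
    have hscan : ∀ s : List Char,
        pvScanB (motif.toList.zipIdx.foldl
          (fun (acc : Nat × PySem.Dict Char Nat) q =>
            if q.1 == 'N' then (acc.1 ||| (1 <<< q.2), acc.2)
            else (acc.1, acc.2.insert q.1 (acc.2.getD q.1 0 ||| (1 <<< q.2))))
          (0, PySem.Dict.empty)).2
          (motif.toList.zipIdx.foldl
          (fun (acc : Nat × PySem.Dict Char Nat) q =>
            if q.1 == 'N' then (acc.1 ||| (1 <<< q.2), acc.2)
            else (acc.1, acc.2.insert q.1 (acc.2.getD q.1 0 ||| (1 <<< q.2))))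
          (0, PySem.Dict.empty)).1
          (1 <<< (motif.toList.length - 1)) 0 s = true ↔
        ∃ a : Nat, a + motif.toList.length ≤ s.length ∧ pvLit motif.toList s a := by
      intro s
      rw [scan_iff _ _ motif.toList s (by omega) hmask s 0 0 (show s = s.drop 0 by simp)
        (by omega) (by intro k; simp [Nat.zero_testBit])]
      rw [← PM_iff_Lit motif.toList s (by omega)]
      constructor
      · rintro ⟨j, -, hPM⟩
        exact ⟨j, hPM⟩
      · rintro ⟨j, hPM⟩
        exact ⟨j, Nat.zero_le _, hPM⟩
    constructor
    · rintro ⟨x, hx, hb⟩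
      exact ⟨x, hx, (hscan x.toList).1 hb⟩
    · rintro ⟨x, hx, hb⟩
      exact ⟨x, hx, (hscan x.toList).2 hb⟩

-- ===== VERDICT (by name: the statement is the Claim_ definition above) =====
theorem inIUPACMatureSeq_spec : Claim_equal_inIUPACMatureSeq := by
  intro motif sequences _
  unfold Spec_inIUPACMatureSeq
  rw [Bool.eq_iff_iff, A_iff, B_iff]
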